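-- pv_equiv track=rewrite | github.com/jNullj/adventofcode-2024 | q4/mapManipulation.py | diag_str_map
-- ===== SOURCE A (Python) =====
-- def diag_str_map(m: dict[(int, int), str], cross=False) -> str:
--     x = 0
--     max_x = max(k[0] for k in m.keys())
--     max_y = max(k[1] for k in m.keys())
--     if cross:
--         y = max_y
--     else:
--         y = 0
--     diag = ''
--     while x <= max_x and y <= max_y:
--         diag += m.get((x, y), '')
--         if cross:
--             x += 1
--             y -= 1
--         else:
--             x += 1
--             y += 1
--     return diag
-- ===== SOURCE B (Python) =====
-- def diag_str_map(m, cross=False):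
--     max_x = max(k[0] for k in m.keys())
--     max_y = max(k[1] for k in m.keys())
--     if cross:
--         on_diag = [kv for kv in m.items()
--                    if kv[0][0] + kv[0][1] == max_y and 0 <= kv[0][0] <= max_x]
--     else:
--         lim = min(max_x, max_y)
--         on_diag = [kv for kv in m.items()
--                    if kv[0][0] == kv[0][1] and 0 <= kv[0][0] <= lim]
--     on_diag.sort(key=lambda kv: kv[0][0])
--     return ''.join(v for _, v in on_diag)
-- ===== Notes on version B (the rewrite author's own statement) =====
-- stated objective: alternative
-- what changed: Replaces A's coordinate-by-coordinate while-walk with probes of the dict by a single filter of the dict's items to the entries lying on the requested diagonal, sorted by x and joined; the per-step lookup loop disappears.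
import Mathlib
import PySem

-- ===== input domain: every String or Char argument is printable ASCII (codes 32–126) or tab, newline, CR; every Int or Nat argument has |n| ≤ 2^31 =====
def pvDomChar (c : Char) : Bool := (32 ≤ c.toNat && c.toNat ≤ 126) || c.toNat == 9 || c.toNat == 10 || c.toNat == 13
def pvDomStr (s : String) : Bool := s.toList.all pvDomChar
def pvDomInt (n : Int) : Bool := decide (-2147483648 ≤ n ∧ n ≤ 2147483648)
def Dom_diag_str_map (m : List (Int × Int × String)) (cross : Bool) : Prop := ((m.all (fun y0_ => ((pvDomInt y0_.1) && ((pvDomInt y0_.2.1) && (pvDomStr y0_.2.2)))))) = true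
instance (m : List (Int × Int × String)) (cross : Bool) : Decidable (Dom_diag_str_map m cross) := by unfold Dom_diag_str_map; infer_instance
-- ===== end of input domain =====

-- B replaces A's coordinate walk with a filter of the dict's items to the
-- diagonal entries, sorted by x and joined (objective: alternative algorithm).

-- ===== PORT A =====
-- A's while loop; terminates because x strictly increases towards max_x.
def diagLoop (d : PySem.Dict (Int × Int) String) (cross : Bool) (maxX maxY : Int)
    (x y : Int) (diag : String) : String :=
  if h : x ≤ maxX ∧ y ≤ maxY then
    diagLoop d cross maxX maxY (x + 1) (if cross then y - 1 else y + 1)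
      (diag ++ d.getD (x, y) "")
  else diag
termination_by (maxX + 1 - x).toNat
decreasing_by omega

def diag_str_map (m : List (Int × Int × String)) (cross : Bool) : String :=
  let d := PySem.Dict.ofList (m.map (fun p => ((p.1, p.2.1), p.2.2)))
  match PySem.List.max? (d.keys.map (fun k => k.1)) (fun v => v),
        PySem.List.max? (d.keys.map (fun k => k.2)) (fun v => v) with
  | some maxX, some maxY =>
      diagLoop d cross maxX maxY 0 (if cross then maxY else 0) ""
  | _, _ => ""   -- max() raises ValueError on an empty dict: excluded by Pre_

-- ===== PORT B =====
def diag_str_map_alt (m : List (Int × Int × String)) (cross : Bool) : String :=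
  let d := PySem.Dict.ofList (m.map (fun p => ((p.1, p.2.1), p.2.2)))
  match PySem.List.max? (d.keys.map (fun k => k.1)) (fun v => v) with
  | none => ""   -- max() raises ValueError on an empty dict: excluded by Pre_
  | some maxX =>
    match PySem.List.max? (d.keys.map (fun k => k.2)) (fun v => v) with
    | none => ""
    | some maxY =>
      let onDiag :=
        if cross then
          d.items.filter (fun kv =>
            decide (kv.1.1 + kv.1.2 = maxY) && decide (0 ≤ kv.1.1) && decide (kv.1.1 ≤ maxX))
        else
          d.items.filter (fun kv =>
            decide (kv.1.1 = kv.1.2) && decide (0 ≤ kv.1.1) && decide (kv.1.1 ≤ min maxX maxY))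
      PySem.Str.join "" ((PySem.List.sorted onDiag (fun kv => kv.1.1) false).map (fun kv => kv.2))

-- ===== PRECONDITION & SPEC =====
-- A raises ValueError (max() of an empty sequence) on the empty dict; Pre_ excludes exactly that input.
def Pre_diag_str_map (m : List (Int × Int × String)) (cross : Bool) : Prop := m ≠ []
instance (m : List (Int × Int × String)) (cross : Bool) : Decidable (Pre_diag_str_map m cross) := by unfold Pre_diag_str_map; infer_instance
def pvWitness_diag_str_map : (List (Int × Int × String)) × Bool := ([((0 : Int), (0 : Int), "a")], false)

def Spec_diag_str_map (m : List (Int × Int × String)) (cross : Bool) (out : String) : Prop := out = diag_str_map_alt m cross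
instance (m : List (Int × Int × String)) (cross : Bool) (out : String) : Decidable (Spec_diag_str_map m cross out) := by unfold Spec_diag_str_map; infer_instance

-- ===== CLAIM (what is proved, stated in full; the proofs are below) =====
def Claim_equal_diag_str_map : Prop := ∀ (m : List (Int × Int × String)) (cross : Bool), Dom_diag_str_map m cross → Pre_diag_str_map m cross → Spec_diag_str_map m cross (diag_str_map m cross)

-- ===== LEMMAS AND PROOFS =====

-- String-level helpers for ''.join with the empty separator
lemma flatten_intersperse_nil {α : Type} (L : List (List α)) :
    (List.intersperse [] L).flatten = L.flatten := by
  induction L with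
  | nil => rfl
  | cons a L ih =>
    cases L with
    | nil => rfl
    | cons b L' => simp_all [List.intersperse]

lemma chars_join_nil (L : List (List Char)) :
    PySem.Chars.join [] L = L.flatten := by
  simp [PySem.Chars.join, List.intercalate, flatten_intersperse_nil]

lemma join_nil_cons (s : String) (l : List String) :
    PySem.Str.join "" (s :: l) = s ++ PySem.Str.join "" l := by
  apply String.toList_inj.mp
  simp [chars_join_nil]

lemma join_nil_nil : PySem.Str.join "" ([] : List String) = "" := by
  apply String.toList_inj.mp
  simp

-- A's loop along the main diagonal (x = y)
lemma diagLoop_main (d : PySem.Dict (Int × Int) String) (maxX maxY : Int) :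
    ∀ (n : Nat) (x : Int) (acc : String), (min maxX maxY + 1 - x).toNat = n →
      diagLoop d false maxX maxY x x acc
        = acc ++ PySem.Str.join ""
            ((PySem.List.pyRange x (min maxX maxY + 1) 1).map (fun t => d.getD (t, t) "")) := by
  intro n
  induction n with
  | zero =>
    intro x acc h
    have hcond : ¬ (x ≤ maxX ∧ x ≤ maxY) := by omega
    rw [diagLoop, dif_neg hcond, PySem.List.pyRange_one_eq_nil (by omega)]
    simp [join_nil_nil]
  | succ n ih =>
    intro x acc h
    by_cases hx : x ≤ min maxX maxY
    · have hcond : x ≤ maxX ∧ x ≤ maxY := by omega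
      rw [diagLoop, dif_pos hcond]
      simp only [Bool.false_eq_true, if_false]
      have h1 : (min maxX maxY + 1 - (x + 1)).toNat = n := by omega
      rw [ih (x + 1) _ h1, PySem.List.pyRange_one_cons (show x < min maxX maxY + 1 by omega)]
      simp [join_nil_cons, String.append_assoc]
    · have hcond : ¬ (x ≤ maxX ∧ x ≤ maxY) := by omega
      rw [diagLoop, dif_neg hcond, PySem.List.pyRange_one_eq_nil (by omega)]
      simp [join_nil_nil]

-- A's loop along the cross diagonal (y = maxY - x)
lemma diagLoop_cross (d : PySem.Dict (Int × Int) String) (maxX maxY : Int) :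
    ∀ (n : Nat) (x : Int) (acc : String), 0 ≤ x → (maxX + 1 - x).toNat = n →
      diagLoop d true maxX maxY x (maxY - x) acc
        = acc ++ PySem.Str.join ""
            ((PySem.List.pyRange x (maxX + 1) 1).map (fun t => d.getD (t, maxY - t) "")) := by
  intro n
  induction n with
  | zero =>
    intro x acc hx h
    have hcond : ¬ (x ≤ maxX ∧ maxY - x ≤ maxY) := by omega
    rw [diagLoop, dif_neg hcond, PySem.List.pyRange_one_eq_nil (by omega)]
    simp [join_nil_nil]
  | succ n ih =>
    intro x acc hx h
    by_cases hxm : x ≤ maxX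
    · have hcond : x ≤ maxX ∧ maxY - x ≤ maxY := by omega
      rw [diagLoop, dif_pos hcond]
      simp only [if_true]
      have harg : maxY - x - 1 = maxY - (x + 1) := by omega
      have h1 : (maxX + 1 - (x + 1)).toNat = n := by omega
      rw [harg, ih (x + 1) _ (by omega) h1, PySem.List.pyRange_one_cons (show x < maxX + 1 by omega)]
      simp [join_nil_cons, String.append_assoc]
    · have hcond : ¬ (x ≤ maxX ∧ maxY - x ≤ maxY) := by omega
      rw [diagLoop, dif_neg hcond, PySem.List.pyRange_one_eq_nil (by omega)]
      simp [join_nil_nil]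

-- dropping the absent coordinates (getD = "") does not change the join
lemma join_filter_contains (d : PySem.Dict (Int × Int) String) (kf : Int → Int × Int) :
    ∀ ts : List Int,
      PySem.Str.join "" ((ts.filter (fun t => d.contains (kf t))).map (fun t => d.getD (kf t) ""))
        = PySem.Str.join "" (ts.map (fun t => d.getD (kf t) "")) := by
  intro ts
  induction ts with
  | nil => rfl
  | cons t ts ih =>
    by_cases hc : d.contains (kf t) = true
    · simp only [List.filter_cons, hc, if_true, List.map_cons, join_nil_cons, ih]
    · have hg : d.getD (kf t) "" = "" :=
        PySem.Dict.getD_of_not_contains d "" (Bool.not_eq_true _ |>.mp hc)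
      simp only [List.filter_cons, hc, if_false, List.map_cons, join_nil_cons, ih, hg,
        Bool.false_eq_true]
      simp

-- the central identity: the sorted filtered item list IS the present diagonal entries in x order
lemma sorted_filter_eq (d : PySem.Dict (Int × Int) String) (hnd : d.keys.Nodup)
    (kf : Int → Int × Int) (hkf : ∀ t, (kf t).1 = t) (N : Int)
    (P : (Int × Int) × String → Bool)
    (hP : ∀ kv, P kv = true ↔ (kv.1 = kf kv.1.1 ∧ 0 ≤ kv.1.1 ∧ kv.1.1 ≤ N)) :
    PySem.List.sorted (d.items.filter P) (fun kv => kv.1.1) false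
      = ((PySem.List.pyRange 0 (N + 1) 1).filter (fun t => d.contains (kf t))).map
          (fun t => (kf t, d.getD (kf t) "")) := by
  have hitems : d.items.Nodup := by
    have : (d.items.map (fun p => p.1)).Nodup := by
      simpa [PySem.Dict.keys] using hnd
    exact this.of_map
  have hmem : ∀ kv, kv ∈ ((PySem.List.pyRange 0 (N + 1) 1).filter
      (fun t => d.contains (kf t))).map (fun t => (kf t, d.getD (kf t) ""))
      ↔ kv ∈ d.items.filter P := by
    intro kv
    constructor
    · rintro h
      rcases List.mem_map.mp h with ⟨t, ht, rfl⟩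
      rcases List.mem_filter.mp ht with ⟨htr, htc⟩
      have htb := PySem.List.mem_pyRange_one.mp htr
      have hk : kf t ∈ d.keys := (PySem.Dict.contains_iff_mem_keys d _).mp htc
      have hsome : (d.get? (kf t)).isSome := by
        rw [← PySem.Dict.contains_eq_isSome_get?]; exact htc
      rcases Option.isSome_iff_exists.mp hsome with ⟨v, hv⟩
      have hgd : d.getD (kf t) "" = v := PySem.Dict.getD_of_get?_eq_some d "" hv
      refine List.mem_filter.mpr ⟨?_, ?_⟩
      · rw [hgd]; exact PySem.Dict.mem_items_of_get?_eq_some d hv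
      · refine (hP _).mpr ?_
        refine ⟨by simp [hkf], by simpa [hkf] using htb.1, by have := htb.2; simp [hkf]; omega⟩
    · rintro h
      rcases List.mem_filter.mp h with ⟨hin, hp⟩
      rcases (hP _).mp hp with ⟨hk, h0, hN⟩
      set t := kv.1.1 with htdef
      have hkv : kv = (kv.1, kv.2) := rfl
      have hget : d.get? kv.1 = some kv.2 :=
        PySem.Dict.get?_of_mem_items d (by rw [← hkv]; exact hin) hnd
      refine List.mem_map.mpr ⟨t, List.mem_filter.mpr ⟨?_, ?_⟩, ?_⟩
      · exact PySem.List.mem_pyRange_one.mpr ⟨h0, by omega⟩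
      · rw [← hk]
        rw [PySem.Dict.contains_eq_isSome_get?, hget]; rfl
      
      · rw [← hk]
        have : d.getD kv.1 "" = kv.2 := PySem.Dict.getD_of_get?_eq_some d "" hget
        rw [this]
  apply PySem.List.sorted_eq_of_perm_of_pairwise_lt _ _ _
  · apply (List.perm_ext_iff_of_nodup ?_ ?_).mpr
    · intro a; rw [hmem a]
    · refine List.Nodup.map ?_ ((PySem.List.nodup_pyRange_one _ _).filter _)
      intro a b hab
      simpa [hkf] using congrArg (fun p => p.1.1) hab
    · exact hitems.filter _
  · refine List.Pairwise.map _ ?_ (List.Pairwise.filter _ (PySem.List.pairwise_lt_pyRange_one 0 (N + 1)))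
    intro a b hab
    simpa [hkf] using hab

-- ===== VERDICT (by name: the statement is the Claim_ definition above) =====
theorem diag_str_map_spec : Claim_equal_diag_str_map := by
  intro m cross _ _
  unfold Spec_diag_str_map diag_str_map diag_str_map_alt
  set L := m.map (fun p => ((p.1, p.2.1), p.2.2)) with hL
  set d := PySem.Dict.ofList L with hdd
  have hnd : d.keys.Nodup := PySem.Dict.nodup_keys_ofList L
  cases hX : PySem.List.max? (d.keys.map (fun k => k.1)) (fun v => v) with
  | none =>
    cases hY : PySem.List.max? (d.keys.map (fun k => k.2)) (fun v => v) <;> simp [hX, hY]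
  | some maxX =>
    cases hY : PySem.List.max? (d.keys.map (fun k => k.2)) (fun v => v) with
    | none => simp [hX, hY]
    | some maxY =>
      simp only [hX, hY]
      cases cross with
      | false =>
        simp only [Bool.false_eq_true, if_false]
        rw [diagLoop_main d maxX maxY _ 0 "" rfl]
        have hP : ∀ kv : (Int × Int) × String,
            (decide (kv.1.1 = kv.1.2) && decide (0 ≤ kv.1.1) && decide (kv.1.1 ≤ min maxX maxY)) = true
              ↔ (kv.1 = (fun t => (t, t)) kv.1.1 ∧ 0 ≤ kv.1.1 ∧ kv.1.1 ≤ min maxX maxY) := by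
          intro kv
          simp only [Bool.and_eq_true, decide_eq_true_eq, Prod.ext_iff, true_and]
          omega
        rw [sorted_filter_eq d hnd (fun t => (t, t)) (fun t => rfl) (min maxX maxY) _ hP]
        simp only [List.map_map, Function.comp_def]
        rw [join_filter_contains d (fun t => (t, t))]
        simp
      | true =>
        simp only [if_true]
        have hA := diagLoop_cross d maxX maxY ((maxX + 1 - 0).toNat) 0 "" (le_refl 0) rfl
        rw [show maxY - (0 : Int) = maxY from by ring] at hA
        rw [hA]
        have hP : ∀ kv : (Int × Int) × String,
            (decide (kv.1.1 + kv.1.2 = maxY) && decide (0 ≤ kv.1.1) && decide (kv.1.1 ≤ maxX)) = true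
              ↔ (kv.1 = (fun t => (t, maxY - t)) kv.1.1 ∧ 0 ≤ kv.1.1 ∧ kv.1.1 ≤ maxX) := by
          intro kv
          simp only [Bool.and_eq_true, decide_eq_true_eq, Prod.ext_iff, true_and]
          omega
        rw [sorted_filter_eq d hnd (fun t => (t, maxY - t)) (fun t => rfl) maxX _ hP]
        simp only [List.map_map, Function.comp_def]
        rw [join_filter_contains d (fun t => (t, maxY - t))]
        simp
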